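-- pv_equiv track=rewrite | github.com/Amatey1/Advanced-algo-summative | summativeQ3.py | decrpyt
-- ===== SOURCE A (Python) =====
-- import itertools
--
-- def decrpyt(text,key):
--     key = int(len(text)/key)
--     vals=[]
--     l = list(text)
--     i=0
--     while i < key:
--             vals.append(l[i: len(text):key])
--             i+=1
--     s = "".join(itertools.chain(*vals))
--     return s
-- ===== SOURCE B (Python) =====
-- def decrpyt(text, key):
--     key = int(len(text) / key)
--     if key <= 0:
--         return ""
--     buckets = [[] for _ in range(key)]
--     for idx, ch in enumerate(text):
--         buckets[idx % key].append(ch)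
--     return "".join("".join(b) for b in buckets)
-- ===== Notes on version B (the rewrite author's own statement) =====
-- stated objective: alternative
-- what changed: A gathers the result with key separate strided slices of the character list (one slice per residue class); B makes a single enumerate pass that scatters each character into buckets[idx % key] and joins the buckets once.
import Mathlib
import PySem

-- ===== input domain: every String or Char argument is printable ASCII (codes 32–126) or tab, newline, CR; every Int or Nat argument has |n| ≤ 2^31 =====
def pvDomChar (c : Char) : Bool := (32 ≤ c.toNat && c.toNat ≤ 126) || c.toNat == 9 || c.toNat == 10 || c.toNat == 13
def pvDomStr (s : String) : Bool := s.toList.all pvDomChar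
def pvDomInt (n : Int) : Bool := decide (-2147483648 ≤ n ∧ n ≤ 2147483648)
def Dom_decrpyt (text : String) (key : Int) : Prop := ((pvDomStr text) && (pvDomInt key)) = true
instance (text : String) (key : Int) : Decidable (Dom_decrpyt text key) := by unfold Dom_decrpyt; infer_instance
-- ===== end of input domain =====

-- B replaces A's per-residue strided slices (column gather) by a single scatter pass into
-- buckets indexed by position mod key (alternative decomposition, same cost).


-- ===== PORT A =====
-- `key = int(len(text)/key)`: float true division, then int() truncates toward zero; on the
-- stated domain (|len| < 2^53, |key| ≤ 2^31) the float quotient never crosses an integer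
-- boundary, so this is exactly Int.tdiv.  The `while i < key` loop appending
-- l[i:len(text):key] is the map over List.range key.toNat; inside the loop key > 0, hence
-- slice? is never none and the `.getD []` default is unreachable.
def decrpyt (text : String) (key : Int) : String :=
  let l := text.toList
  let k : Int := Int.tdiv (l.length : Int) key
  let vals : List (List Char) :=
    (List.range k.toNat).map (fun (i : Nat) =>
      (PySem.List.slice? l (some (i : Int)) (some ((l.length : Int))) k).getD [])
  String.mk vals.flatten

-- ===== PORT B =====
-- loop body of Source B: buckets[idx % key].append(ch)
def bStep (k : Int) (bs : List (List Char)) (p : Int × Char) : List (List Char) :=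
  let m := (PySem.Int.mod p.1 k).toNat
  bs.set m (bs.getD m [] ++ [p.2])

def decrpyt_alt (text : String) (key : Int) : String :=
  let l := text.toList
  let k : Int := Int.tdiv (l.length : Int) key
  if k ≤ 0 then "" else
    let buckets := (PySem.List.enumerate l 0).foldl (bStep k) (List.replicate k.toNat [])
    String.mk buckets.flatten

-- ===== PRECONDITION & SPEC =====
-- key = 0 makes Python A (and B alike) raise ZeroDivisionError; A raises nowhere else.
def Pre_decrpyt (text : String) (key : Int) : Prop := key ≠ 0
instance (text : String) (key : Int) : Decidable (Pre_decrpyt text key) := by unfold Pre_decrpyt; infer_instance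
def pvWitness_decrpyt : String × Int := ("HWeolrllod", 2)

def Spec_decrpyt (text : String) (key : Int) (out : String) : Prop := out = decrpyt_alt text key
instance (text : String) (key : Int) (out : String) : Decidable (Spec_decrpyt text key out) := by unfold Spec_decrpyt; infer_instance

-- ===== CLAIM (what is proved, stated in full; the proofs are below) =====
def Claim_equal_decrpyt : Prop := ∀ (text : String) (key : Int), Dom_decrpyt text key → Pre_decrpyt text key → Spec_decrpyt text key (decrpyt text key)

-- ===== LEMMAS AND PROOFS =====

-- the characters of l at positions ≡ i (mod n), in order: the common value of the two
-- programs' i-th bucket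
def colSel (l : List Char) (n i : Nat) : List Char :=
  ((List.range l.length).filter (fun p => p % n == i)).map (fun p => l.getD p ' ')

lemma lt_cnt_iff (L i n j : Nat) (h0 : 0 < n) (hi : i < L) :
    j < (L - i + n - 1) / n ↔ i + n * j < L := by
  rw [show (j < (L - i + n - 1) / n) ↔ (j + 1 ≤ (L - i + n - 1) / n) from Iff.rfl,
      Nat.le_div_iff_mul_le h0]
  have h : (j + 1) * n = n * j + n := by ring
  omega

lemma range_filter_mod (L i n : Nat) (h0 : 0 < n) (hin : i < n) (hi : i < L) :
    (List.range L).filter (fun p => p % n == i) =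
      (List.range ((L - i + n - 1) / n)).map (fun j => i + n * j) := by
  have hsL : ((List.range L).filter (fun p => p % n == i)).Pairwise (· < ·) :=
    (List.pairwise_lt_range).filter _
  have hsR : (((List.range ((L - i + n - 1) / n)).map (fun j => i + n * j))).Pairwise (· < ·) :=
    List.Pairwise.map _ (fun a b h => Nat.add_lt_add_left ((Nat.mul_lt_mul_left h0).mpr h) i)
      List.pairwise_lt_range
  have hperm : List.Perm ((List.range L).filter (fun p => p % n == i))
      ((List.range ((L - i + n - 1) / n)).map (fun j => i + n * j)) := by
    rw [List.perm_ext_iff_of_nodup ((List.nodup_range).filter _)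
        (hsR.imp (fun {a b} h => Nat.ne_of_lt h))]
    intro x
    simp only [List.mem_filter, List.mem_range, List.mem_map, beq_iff_eq]
    constructor
    · rintro ⟨hxL, hxm⟩
      have hd := Nat.div_add_mod x n
      exact ⟨x / n, (lt_cnt_iff L i n _ h0 hi).2 (by omega), by omega⟩
    · rintro ⟨j, hj, rfl⟩
      rw [lt_cnt_iff L i n _ h0 hi] at hj
      exact ⟨hj, by simp [Nat.add_mul_mod_self_left, Nat.mod_eq_of_lt hin]⟩
  exact hperm.eq_of_pairwise (fun a b _ _ h1 h2 => by omega) hsL hsR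

lemma filterMap_eq_map_of {α β : Type} (xs : List α) (f : α → Option β) (g : α → β)
    (h : ∀ x ∈ xs, f x = some (g x)) : xs.filterMap f = xs.map g := by
  induction xs with
  | nil => rfl
  | cons a as ih =>
      simp only [List.filterMap_cons, h a (List.mem_cons_self), List.map_cons]
      rw [ih (fun x hx => h x (List.mem_cons_of_mem a hx))]

lemma slice_char (l : List Char) (n i : Nat) (h0 : 0 < n) (hin : i < n) (hn : n ≤ l.length) :
    (PySem.List.slice? l (some (i : Int)) (some ((l.length : Int))) (n : Int)).getD []
      = colSel l n i := by
  have hiL : i < l.length := lt_of_lt_of_le hin hn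
  have hne : ¬((n : Int) = 0) := by omega
  have hnlt : ¬((n : Int) < 0) := by omega
  have hpos : (0 : Int) < (n : Int) := by omega
  simp only [PySem.List.slice?, PySem.List.sliceIndices, hne, hnlt, hpos, if_false, if_true,
    show ¬((i : Int) < 0) from by omega, show ¬((l.length : Int) < 0) from by omega]
  rw [min_eq_left (by omega : (i:Int) ≤ (l.length : Int)), min_self,
    if_pos (by omega : (i:Int) < (l.length : Int))]
  have hcnt : (((l.length : Int) - (i : Int) + (n : Int) - 1) / (n : Int)).toNat
      = (l.length - i + n - 1) / n := by
    rw [show ((l.length : Int) - (i : Int) + (n : Int) - 1) = ((l.length - i + n - 1 : Nat) : Int)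
      from by omega, ← Int.natCast_div, Int.toNat_natCast]
  rw [hcnt, Option.getD_some,
    filterMap_eq_map_of _ _ (fun j => l.getD (i + n * j) ' ') ?_]
  · rw [colSel, range_filter_mod l.length i n h0 hin hiL, List.map_map]
    rfl
  · intro j hj
    rw [List.mem_range, lt_cnt_iff l.length i n j h0 hiL] at hj
    rw [show ((i : Int) + (n : Int) * (j : Int)).toNat = i + n * j from by omega]
    rw [List.getElem?_eq_getElem hj]
    simp [List.getD, List.getElem?_eq_getElem hj]

lemma getD_set (xs : List (List Char)) (m j : Nat) (v : List Char) (hm : m < xs.length) :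
    (xs.set m v).getD j [] = if m = j then v else xs.getD j [] := by
  rcases eq_or_ne m j with rfl | hne
  · simp [List.getD, hm]
  · simp [List.getD, List.getElem?_set_ne hne, hne]

-- the scatter loop of B: after the fold, bucket j holds bs[j] ++ (chars at positions ≡ j mod n)
lemma scatter (n : Nat) (hn : 0 < n) (l : List Char) :
    ∀ bs : List (List Char), bs.length = n →
      ((PySem.List.enumerate l 0).foldl (bStep (n : Int)) bs).length = n ∧
      ∀ j, j < n →
        ((PySem.List.enumerate l 0).foldl (bStep (n : Int)) bs).getD j []
          = bs.getD j [] ++ colSel l n j := by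
  induction l using List.reverseRecOn with
  | nil =>
      intro bs hbs
      refine ⟨by simpa [PySem.List.enumerate_nil] using hbs, fun j hj => by
        simp [PySem.List.enumerate_nil, colSel]⟩
  | append_singleton l' c ih =>
      intro bs hbs
      have henum : PySem.List.enumerate (l' ++ [c]) 0
          = PySem.List.enumerate l' 0 ++ [((l'.length : Int), c)] := by
        rw [PySem.List.enumerate_append]
        simp [PySem.List.enumerate_cons, PySem.List.enumerate_nil]
      obtain ⟨ihlen, ihget⟩ := ih bs hbs
      set prev := (PySem.List.enumerate l' 0).foldl (bStep (n : Int)) bs with hprev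
      have hmod : (PySem.Int.mod ((l'.length : Int)) (n : Int)).toNat = l'.length % n := by
        rw [PySem.Int.mod_eq_emod_of_pos (by exact_mod_cast hn)]
        rw [show ((l'.length : Int) % (n : Int)) = ((l'.length % n : Nat) : Int) from by
          push_cast; ring]
        exact Int.toNat_natCast _
      have hmlt : l'.length % n < prev.length := by rw [ihlen]; exact Nat.mod_lt _ hn
      have hstep : (PySem.List.enumerate (l' ++ [c]) 0).foldl (bStep (n : Int)) bs
          = (prev.set (l'.length % n) (prev.getD (l'.length % n) [] ++ [c])) := by
        rw [henum, List.foldl_append]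
        simp only [List.foldl_cons, List.foldl_nil, bStep, hmod]
        rfl
      constructor
      · rw [hstep, List.length_set, ihlen]
      · intro j hj
        have hcol : colSel (l' ++ [c]) n j
            = colSel l' n j ++ (if l'.length % n = j then [c] else []) := by
          have hlen : (l' ++ [c]).length = l'.length + 1 := by simp
          rw [colSel, hlen, List.range_succ, List.filter_append, List.map_append]
          congr 1
          · rw [colSel]
            apply List.map_congr_left
            intro p hp
            rw [List.mem_filter, List.mem_range] at hp
            exact List.getD_append _ _ _ _ hp.1
          · rcases eq_or_ne (l'.length % n) j with he | hne
            · simp [he]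
            · simp [hne]
        rw [hstep, getD_set _ _ _ _ hmlt, hcol]
        rcases eq_or_ne (l'.length % n) j with he | hne
        · subst he
          rw [ihget _ hj]
          simp [List.append_assoc]
        · rw [if_neg hne, if_neg hne, List.append_nil]
          exact ihget j hj

-- ===== VERDICT (by name: the statement is the Claim_ definition above) =====
theorem decrpyt_spec : Claim_equal_decrpyt := by
  intro text key hdom hpre
  simp only [Spec_decrpyt, decrpyt, decrpyt_alt]
  set l := text.toList with hl
  set k : Int := Int.tdiv (l.length : Int) key with hk
  by_cases hk0 : k ≤ 0
  · rw [if_pos hk0, Int.toNat_of_nonpos hk0]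
    simp [List.range_zero]
    rfl
  · rw [if_neg hk0]
    rw [not_le] at hk0
    set n := k.toNat with hn
    have hkn : k = (n : Int) := (Int.toNat_of_nonneg hk0.le).symm
    have hnpos : 0 < n := by omega
    -- key must be positive (a nonpositive key gives k ≤ 0), hence k ≤ len
    have hkey : 1 ≤ key := by
      by_contra h
      rw [not_le] at h
      have hkey' : key ≤ -1 := by
        have := hpre
        unfold Pre_decrpyt at this
        omega
      have h1 : (0 : Int) ≤ Int.tdiv (l.length : Int) (-key) :=
        Int.tdiv_nonneg (by positivity) (by omega)
      have h2 : Int.tdiv (l.length : Int) key = -Int.tdiv (l.length : Int) (-key) := by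
        rw [show key = -(-key) from by ring, Int.tdiv_neg, neg_neg]
      omega
    have hnle : n ≤ l.length := by
      have h1 : Int.tdiv (l.length : Int) key ≤ (l.length : Int) :=
        Int.tdiv_le_self key (by positivity)
      omega
    obtain ⟨blen, bget⟩ := scatter n hnpos l (List.replicate n []) (by simp)
    have hvb : (List.range n).map (fun (i : Nat) =>
          (PySem.List.slice? l (some (i : Int)) (some ((l.length : Int))) k).getD [])
        = (PySem.List.enumerate l 0).foldl (bStep k) (List.replicate n []) := by
      rw [hkn]
      apply List.ext_getElem
      · rw [List.length_map, List.length_range, blen]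
      · intro i h1 h2
        rw [List.getElem_map, List.getElem_range]
        have hi : i < n := by simpa using h1
        rw [slice_char l n i hnpos hi hnle]
        rw [← List.getD_eq_getElem _ [] h2, bget i hi]
        simp
    rw [hvb]
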